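-- pv_equiv track=rewrite | github.com/graysky-ai/Lexibrary | src/lexibrary/playbooks/template.py | _replace_with_flow_list
-- ===== SOURCE A (Python) =====
-- def _replace_with_flow_list(yaml_str: str, key: str, values: list[str]) -> str:
--     """Replace a YAML block list with an inline flow list for *key*."""
--     flow = f"[{', '.join(values)}]" if values else "[]"
--     target = f"{key}: {flow}"
--
--     lines = yaml_str.splitlines()
--     new_lines: list[str] = []
--     skip_items = False
--     for line in lines:
--         if line.startswith(f"{key}:"):
--             new_lines.append(target)
--             skip_items = line.rstrip() == f"{key}:"
--             continue
--         if skip_items: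
--             if line.startswith("- ") or line.startswith("  -"):
--                 continue
--             skip_items = False
--         new_lines.append(line)
--
--     return "\n".join(new_lines)
-- ===== SOURCE B (Python) =====
-- def _replace_with_flow_list(yaml_str: str, key: str, values: list[str]) -> str:
--     """Replace a YAML block list with an inline flow list for *key*."""
--     target = f"{key}: [{', '.join(values)}]"
--     head = f"{key}:"
--     out: list[str] = []      # output lines, assembled back to front
--     pending: list[str] = []  # a run of list-item lines whose fate the preceding line decides
--     for line in reversed(yaml_str.splitlines()):
--         if line.startswith(head):
--             # header: the pending items are its block; drop them iff the header is bare
--             out = [target] + ([] if line.rstrip() == head else pending) + out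
--             pending = []
--         elif line.startswith("- ") or line.startswith("  -"):
--             pending = [line] + pending
--         else:
--             out = [line] + pending + out
--             pending = []
--     return "\n".join(pending + out)
-- ===== Notes on version B (the rewrite author's own statement) =====
-- stated objective: alternative
-- what changed: A threads a skip_items flag forward through one left-to-right pass; B scans the lines back to front, buffering each maximal run of list-item lines in a deferred 'pending' list and deciding only when the line preceding the run is seen (bare header: drop the run; anything else: keep it), so no skip state is carried in scan direction.
import Mathlib
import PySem

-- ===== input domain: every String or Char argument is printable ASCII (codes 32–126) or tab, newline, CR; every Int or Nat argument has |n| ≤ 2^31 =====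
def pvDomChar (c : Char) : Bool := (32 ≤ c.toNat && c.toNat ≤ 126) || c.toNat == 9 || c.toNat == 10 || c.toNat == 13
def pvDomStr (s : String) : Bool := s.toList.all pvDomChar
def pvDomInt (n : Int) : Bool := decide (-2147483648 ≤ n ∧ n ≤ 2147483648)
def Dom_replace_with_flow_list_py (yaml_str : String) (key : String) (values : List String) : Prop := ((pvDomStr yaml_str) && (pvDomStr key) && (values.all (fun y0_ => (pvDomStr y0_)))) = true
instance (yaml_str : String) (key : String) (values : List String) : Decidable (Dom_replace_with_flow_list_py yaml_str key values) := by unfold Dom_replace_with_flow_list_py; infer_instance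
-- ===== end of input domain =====

-- B replaces A's forward pass with a skip flag by a BACKWARD pass that buffers each run of
-- list-item lines and lets the line preceding the run decide its fate (objective: alternative).

-- ===== PORT A =====
-- A's for-loop with the skip_items flag, as structural recursion over the lines with the flag as state.
def pvALoop (keyc target : String) : Bool → List String → List String
  | _, [] => []
  | skip, line :: rest =>
    if PySem.Str.startswith line keyc then
      target :: pvALoop keyc target (PySem.Str.rstrip line == keyc) rest
    else if skip then
      (if PySem.Str.startswith line "- " || PySem.Str.startswith line "  -" then
        pvALoop keyc target true rest
      else
        line :: pvALoop keyc target false rest)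
    else
      line :: pvALoop keyc target false rest

def replace_with_flow_list_py (yaml_str : String) (key : String) (values : List String) : String :=
  let flow := if values.isEmpty then "[]" else "[" ++ PySem.Str.join ", " values ++ "]"
  let target := key ++ ": " ++ flow
  PySem.Str.join "\n" (pvALoop (key ++ ":") target false (PySem.Str.splitlines yaml_str))

-- ===== PORT B =====
-- B's loop body: state is (out, pending); one step per line, taken back to front.
def pvBStep (keyc target : String) (st : List String × List String) (line : String) :
    List String × List String :=
  if PySem.Str.startswith line keyc then
    (target :: ((if PySem.Str.rstrip line == keyc then [] else st.2) ++ st.1), [])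
  else if PySem.Str.startswith line "- " || PySem.Str.startswith line "  -" then
    (st.1, line :: st.2)
  else
    (line :: (st.2 ++ st.1), [])

def replace_with_flow_list_py_alt (yaml_str : String) (key : String) (values : List String) : String :=
  let target := key ++ ": [" ++ PySem.Str.join ", " values ++ "]"
  let keyc := key ++ ":"
  let st := (PySem.Str.splitlines yaml_str).reverse.foldl (pvBStep keyc target) ([], [])
  PySem.Str.join "\n" (st.2 ++ st.1)

-- ===== PRECONDITION & SPEC =====
def Spec_replace_with_flow_list_py (yaml_str : String) (key : String) (values : List String) (out : String) : Prop := out = replace_with_flow_list_py_alt yaml_str key values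
instance (yaml_str : String) (key : String) (values : List String) (out : String) : Decidable (Spec_replace_with_flow_list_py yaml_str key values out) := by unfold Spec_replace_with_flow_list_py; infer_instance

-- ===== CLAIM (what is proved, stated in full; the proofs are below) =====
def Claim_equal_replace_with_flow_list_py : Prop := ∀ (yaml_str : String) (key : String) (values : List String), Dom_replace_with_flow_list_py yaml_str key values → Spec_replace_with_flow_list_py yaml_str key values (replace_with_flow_list_py yaml_str key values)

-- ===== LEMMAS AND PROOFS =====

-- The backward fold, read as a foldr; its pending component is the leading run of item lines,
-- and the invariant ties it to A's flag loop in both flag states at once.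
theorem pvAB (keyc target : String) (xs : List String) :
    pvALoop keyc target false xs =
      (xs.foldr (fun line s => pvBStep keyc target s line) ([], [])).2 ++
      (xs.foldr (fun line s => pvBStep keyc target s line) ([], [])).1 ∧
    pvALoop keyc target true xs =
      (xs.foldr (fun line s => pvBStep keyc target s line) ([], [])).1 := by
  induction xs with
  | nil => exact ⟨rfl, rfl⟩
  | cons line rest ih =>
    obtain ⟨h0, h1⟩ := ih
    by_cases hsw : PySem.Chars.startswith line.toList keyc.toList = true
    · by_cases hk : PySem.Str.rstrip line = keyc
      · constructor <;> simp [pvALoop, pvBStep, hsw, hk, h1]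
      · have hk' : (PySem.Str.rstrip line == keyc) = false := beq_eq_false_iff_ne.mpr hk
        constructor <;> simp [pvALoop, pvBStep, hsw, hk, hk', h0]
    · by_cases hp : (PySem.Chars.startswith line.toList ['-', ' '] = true ∨
          PySem.Chars.startswith line.toList [' ', ' ', '-'] = true)
      · constructor <;> simp [pvALoop, pvBStep, hsw, hp, h0, h1]
      · constructor <;> simp [pvALoop, pvBStep, hsw, hp, h0]

-- ===== VERDICT (by name: the statement is the Claim_ definition above) =====
theorem replace_with_flow_list_py_spec : Claim_equal_replace_with_flow_list_py := by
  intro yaml_str key values _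
  unfold Spec_replace_with_flow_list_py replace_with_flow_list_py replace_with_flow_list_py_alt
  have htar : key ++ ": " ++ (if values.isEmpty then "[]" else "[" ++ PySem.Str.join ", " values ++ "]")
      = key ++ ": [" ++ PySem.Str.join ", " values ++ "]" := by
    by_cases hv : values.isEmpty
    · -- ", ".join([]) = "", so A's "[]" and B's "[" ++ "" ++ "]" coincide
      rw [List.isEmpty_iff.mp hv]
      simp [String.append_assoc, PySem.Str.join]
    · have h : (": " : String) ++ "[" = ": [" := by decide
      rw [if_neg hv]
      simp [String.append_assoc]
      rw [← String.append_assoc (s₁ := ": ") (s₂ := "["), h]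
  simp only [htar, List.foldl_reverse,
    (pvAB (key ++ ":") (key ++ ": [" ++ PySem.Str.join ", " values ++ "]")
      (PySem.Str.splitlines yaml_str)).1]
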